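-- pv_equiv track=rewrite | github.com/liyapo/RailroadGraph | main.py | fun_iter
-- ===== SOURCE A (Python) =====
-- def fun_iter(trips):
--     trips_iter = {}
--     merged_iter_dict = trips
--     stops = 0
--
--     # going through the dictionary to check which routes can be merged
--     # creating new routes, adding new routes and their distances to {trips_iter}
--     for key1 in trips:
--         for key2 in trips:
--             if key1[-1] == key2[0]:
--                 distance = 0
--                 route = key1 + key2[1:]
--                 stops = len(route) - 1
--                 distance = trips[key1][0] + trips[key2][0]
--                 trips_iter[route] = [distance, stops]
--
--     # merging the initial dictionary with the new trips
--     merged_iter_dict.update(trips_iter)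
--     return merged_iter_dict
-- ===== SOURCE B (Python) =====
-- def fun_iter(trips):
--     # Bucket routes by their first stop-letter, then for each route visit only
--     # the routes that can actually extend it, instead of scanning all pairs.
--     index = {}
--     for k in trips:
--         index.setdefault(k[0], []).append(k)
--     new_trips = {}
--     for k1, v1 in trips.items():
--         for k2 in index.get(k1[-1], []):
--             route = k1 + k2[1:]
--             new_trips[route] = [v1[0] + trips[k2][0], len(route) - 1]
--     trips.update(new_trips)
--     return trips
-- ===== Notes on version B (the rewrite author's own statement) =====
-- stated objective: alternative
-- what changed: Replaced the all-pairs nested scan over the dict with a one-pass bucket index keyed by each route's first letter, so each route only visits the routes that can actually extend it (O(n + matches) work; matches can still be quadratic on merge-dense inputs, so no speed is claimed).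
import Mathlib
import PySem

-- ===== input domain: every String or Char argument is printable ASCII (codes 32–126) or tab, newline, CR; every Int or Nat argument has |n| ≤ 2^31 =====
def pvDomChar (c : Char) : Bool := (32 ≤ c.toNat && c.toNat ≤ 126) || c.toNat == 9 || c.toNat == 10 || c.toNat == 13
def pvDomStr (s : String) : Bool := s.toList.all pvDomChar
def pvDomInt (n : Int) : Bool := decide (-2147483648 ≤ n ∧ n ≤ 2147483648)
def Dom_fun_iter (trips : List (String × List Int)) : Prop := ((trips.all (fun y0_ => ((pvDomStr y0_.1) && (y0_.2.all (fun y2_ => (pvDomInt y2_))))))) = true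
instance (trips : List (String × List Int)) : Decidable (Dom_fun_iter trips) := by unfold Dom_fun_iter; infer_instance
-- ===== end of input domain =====

-- B replaces A's all-pairs nested scan with a first-letter bucket index (one pass to build,
-- then each route visits only the routes that can extend it).  Both A and B mutate the
-- argument dict in place (dict.update); the equivalence proved here is about the RETURN value.

-- ===== PORT A =====
def fun_iter (trips : List (String × List Int)) : List (String × List Int) :=
  let d := PySem.Dict.ofList trips
  let ti : PySem.Dict String (List Int) :=
    d.keys.foldl (fun ti key1 =>
      d.keys.foldl (fun ti key2 =>
        match PySem.Str.pyGet? key1 (-1), PySem.Str.pyGet? key2 0 with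
        | some a, some b =>
          if a = b then
            let route : String := String.ofList (key1.toList ++ PySem.List.slice key2.toList (some 1) none)
            let stops : Int := (PySem.Str.len route : Int) - 1
            match PySem.List.pyGet? (d.getD key1 []) 0, PySem.List.pyGet? (d.getD key2 []) 0 with
            | some x, some y => ti.insert route [x + y, stops]
            | _, _ => ti   -- Python raises IndexError here; excluded by Pre_fun_iter
          else ti
        | _, _ => ti       -- Python raises IndexError on an empty key; excluded by Pre_fun_iter
        ) ti)
      PySem.Dict.empty
  (d.update ti.items).items

-- ===== PORT B =====
-- index.setdefault(k[0], []).append(k) — one step of B's index-building pass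
def bucketAdd (ix : PySem.Dict Char (List String)) (k : String) : PySem.Dict Char (List String) :=
  match PySem.Str.pyGet? k 0 with
  | some c => ix.modify c [] (· ++ [k])
  | none => ix          -- Python raises IndexError on an empty key; excluded by Pre_fun_iter

def fun_iter_alt (trips : List (String × List Int)) : List (String × List Int) :=
  let d := PySem.Dict.ofList trips
  let idx : PySem.Dict Char (List String) :=
    d.keys.foldl bucketAdd PySem.Dict.empty
  let nw : PySem.Dict String (List Int) :=
    d.items.foldl (fun nw p =>
      match PySem.Str.pyGet? p.1 (-1) with
      | some a =>
        (idx.getD a []).foldl (fun nw k2 =>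
          let route : String := String.ofList (p.1.toList ++ PySem.List.slice k2.toList (some 1) none)
          match PySem.List.pyGet? p.2 0 with      -- v1[0]: IndexError (excluded by Pre_) = none
          | some x =>
            match PySem.List.pyGet? (d.getD k2 []) 0 with   -- trips[k2][0]: IndexError = none
            | some y => nw.insert route [x + y, (PySem.Str.len route : Int) - 1]
            | none => nw
          | none => nw
          ) nw
      | none => nw          -- Python raises IndexError on an empty key; excluded by Pre_fun_iter
      ) PySem.Dict.empty
  (d.update nw.items).items

-- ===== PRECONDITION & SPEC =====
-- Pre_ excludes exactly the inputs on which Python A raises IndexError: a dict containing an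
-- empty key (key1[-1]/key2[0] fail), or a mergeable pair one of whose value lists is empty
-- (trips[key][0] fails).
def Pre_fun_iter (trips : List (String × List Int)) : Prop :=
  ∀ p ∈ (PySem.Dict.ofList trips).items, p.1 ≠ "" ∧
    ∀ q ∈ (PySem.Dict.ofList trips).items,
      PySem.Str.pyGet? p.1 (-1) = PySem.Str.pyGet? q.1 0 → p.2 ≠ [] ∧ q.2 ≠ []
instance (trips : List (String × List Int)) : Decidable (Pre_fun_iter trips) := by
  unfold Pre_fun_iter; infer_instance

def pvWitness_fun_iter : (List (String × List Int)) := [("ab", [3]), ("bc", [4, 1])]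

def Spec_fun_iter (trips : List (String × List Int)) (out : List (String × List Int)) : Prop := out = fun_iter_alt trips
instance (trips : List (String × List Int)) (out : List (String × List Int)) : Decidable (Spec_fun_iter trips out) := by unfold Spec_fun_iter; infer_instance

-- ===== CLAIM (what is proved, stated in full; the proofs are below) =====
def Claim_equal_fun_iter : Prop := ∀ (trips : List (String × List Int)), Dom_fun_iter trips → Pre_fun_iter trips → Spec_fun_iter trips (fun_iter trips)

-- ===== LEMMAS AND PROOFS =====

-- The insertion both loops perform for a mergeable pair (key1 with value v1, key2),
-- in A's shape (one match on both lookups) and in B's shape (nested matches).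
def stepA (d : PySem.Dict String (List Int)) (key1 : String) (v1 : List Int)
    (ti : PySem.Dict String (List Int)) (k2 : String) : PySem.Dict String (List Int) :=
  let route : String := String.ofList (key1.toList ++ PySem.List.slice k2.toList (some 1) none)
  match PySem.List.pyGet? v1 0, PySem.List.pyGet? (d.getD k2 []) 0 with
  | some x, some y => ti.insert route [x + y, (PySem.Str.len route : Int) - 1]
  | _, _ => ti

def stepB (d : PySem.Dict String (List Int)) (key1 : String) (v1 : List Int)
    (ti : PySem.Dict String (List Int)) (k2 : String) : PySem.Dict String (List Int) :=
  let route : String := String.ofList (key1.toList ++ PySem.List.slice k2.toList (some 1) none)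
  match PySem.List.pyGet? v1 0 with
  | some x =>
    match PySem.List.pyGet? (d.getD k2 []) 0 with
    | some y => ti.insert route [x + y, (PySem.Str.len route : Int) - 1]
    | none => ti
  | none => ti

theorem stepA_eq_stepB (d : PySem.Dict String (List Int)) (key1 : String) (v1 : List Int) :
    stepA d key1 v1 = stepB d key1 v1 := by
  funext ti k2
  unfold stepA stepB
  cases PySem.List.pyGet? v1 0 <;> cases PySem.List.pyGet? (d.getD k2 []) 0 <;> rfl

-- A's guarded scan over ALL keys is the unguarded scan over the matching keys only.
theorem match_fold {β : Type} (g : String → Option Char) (o1 : Option Char) (ks : List String)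
    (step : β → String → β) (ti : β) :
    ks.foldl (fun ti k2 =>
      match o1, g k2 with
      | some a, some b => if a = b then step ti k2 else ti
      | _, _ => ti) ti
    = match o1 with
      | some a => (ks.filter (fun k2 => g k2 == some a)).foldl step ti
      | none => ti := by
  induction ks generalizing ti with
  | nil => cases o1 <;> rfl
  | cons k ks ih =>
    simp only [List.foldl_cons, List.filter_cons]
    cases o1 with
    | none => exact ih _
    | some a =>
      cases h : g k with
      | none => exact ih _
      | some b =>
        by_cases hab : a = b
        · subst hab
          simp only [BEq.rfl, if_true]
          exact ih _
        · have hba : (some b == some a) = false := by simp [Ne.symm hab]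
          simp only [hba, Bool.false_eq_true, if_false, if_neg hab]
          exact ih _

-- B's bucket for a letter holds exactly the keys starting with that letter, in order.
theorem idx_getD (ks : List String)
    (ix : PySem.Dict Char (List String)) (c : Char) :
    (ks.foldl bucketAdd ix).getD c []
    = ix.getD c [] ++ ks.filter (fun k => PySem.Str.pyGet? k 0 == some c) := by
  induction ks generalizing ix with
  | nil => simp
  | cons k ks ih =>
    simp only [List.foldl_cons, List.filter_cons, bucketAdd]
    cases h : PySem.Str.pyGet? k 0 with
    | none => simp [ih]
    | some c' =>
      by_cases hc : c = c'
      · subst hc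
        simp [ih, PySem.Dict.getD_modify_self]
      · have : (some c' == some c) = false := by simp [Ne.symm hc]
        simp [this, ih, PySem.Dict.getD_modify, hc]

-- ===== VERDICT (by name: the statement is the Claim_ definition above) =====
theorem fun_iter_spec : Claim_equal_fun_iter := by
  intro trips _hDom _hPre
  unfold Spec_fun_iter fun_iter fun_iter_alt
  have hnd : (PySem.Dict.ofList trips).keys.Nodup := PySem.Dict.nodup_keys_ofList trips
  set d := PySem.Dict.ofList trips with hd
  refine congrArg PySem.Dict.items (congrArg (PySem.Dict.update d) (congrArg PySem.Dict.items ?_))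
  rw [PySem.Dict.items_eq_map_keys d hnd [], List.foldl_map]
  refine List.foldl_ext _ _ _ ?_
  intro nw k1 _
  refine (match_fold (fun k2 => PySem.Str.pyGet? k2 0) (PySem.Str.pyGet? k1 (-1)) d.keys
      (stepA d k1 (d.getD k1 [])) nw).trans ?_
  cases h1 : PySem.Str.pyGet? k1 (-1) with
  | none => rfl
  | some a =>
    rw [stepA_eq_stepB]
    simp only [idx_getD, PySem.Dict.getD_empty]
    rfl
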